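-- pv_equiv track=rewrite | github.com/ash255/wibu | common.py | wibu_get_bits
-- ===== SOURCE A (Python) =====
-- def wibu_get_bits(h256, length):
--     mask = 1
--     ret = ""
--     for i in range(length):
--         if((h256[i//8] & mask) != 0):
--             ret += "1"
--         else:
--             ret += "0"
--         mask *= 2
--         if(mask == 0x100):
--             mask = 1
--     return ret
-- ===== SOURCE B (Python) =====
-- def wibu_get_bits(h256, length):
--     nbytes = (length + 7) // 8 if length > 0 else 0
--     chunks = [''.join('1' if h256[b] & (1 << k) else '0' for k in range(8))
--               for b in range(nbytes)]
--     return ''.join(chunks)[:length]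
-- ===== Notes on version B (the rewrite author's own statement) =====
-- stated objective: idiomatic
-- what changed: A's bit-by-bit loop that threads a cycling mask and a per-bit conditional append is replaced by per-byte generation of 8-character LSB-first chunks, joined and trimmed to length.
import Mathlib
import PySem

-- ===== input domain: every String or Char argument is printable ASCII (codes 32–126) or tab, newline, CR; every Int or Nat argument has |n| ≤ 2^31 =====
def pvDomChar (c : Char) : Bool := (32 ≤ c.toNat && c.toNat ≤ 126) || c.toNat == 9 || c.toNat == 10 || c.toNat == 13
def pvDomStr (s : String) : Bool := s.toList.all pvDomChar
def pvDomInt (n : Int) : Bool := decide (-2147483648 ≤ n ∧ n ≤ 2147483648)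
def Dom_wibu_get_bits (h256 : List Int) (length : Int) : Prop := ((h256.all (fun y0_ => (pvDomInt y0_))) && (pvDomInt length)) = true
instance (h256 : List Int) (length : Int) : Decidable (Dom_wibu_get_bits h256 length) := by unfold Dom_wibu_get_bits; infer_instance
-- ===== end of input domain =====

-- B replaces A's bit-by-bit loop with its cycling mask state by per-byte 8-bit chunk
-- generation joined and trimmed to length (objective: idiomatic decomposition).

-- ===== PORT A =====
-- Python str built as List Char; h256[i//8] would raise IndexError exactly when
-- length > 8*len(h256) (excluded by Pre_), so the pyGetD default 0 is unreachable there.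
def wibu_get_bits (h256 : List Int) (length : Int) : String :=
  let st := (PySem.List.pyRange 0 length 1).foldl
    (fun (st : Int × List Char) i =>
      let ret := if PySem.Int.band (PySem.List.pyGetD h256 (PySem.Int.floordiv i 8) 0) st.1 ≠ 0
                 then st.2 ++ ['1'] else st.2 ++ ['0']
      let mask := st.1 * 2
      ((if mask = 256 then 1 else mask), ret))
    (1, ([] : List Char))
  String.ofList st.2

-- ===== PORT B =====
-- Source B: nbytes = (length+7)//8 if length > 0 else 0; per-byte chunks of 8 bit-chars
-- ('1 << k' is '(1 : Int) <<< k.toNat', exact since k ∈ range(8) is nonnegative);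
-- ''.join(...) is Chars.join []; the final [:length] is List.slice.
def wibu_get_bits_alt (h256 : List Int) (length : Int) : String :=
  let nbytes : Int := if 0 < length then PySem.Int.floordiv (length + 7) 8 else 0
  let chunks : List (List Char) :=
    (PySem.List.pyRange 0 nbytes 1).map (fun b =>
      (PySem.List.pyRange 0 8 1).map (fun k =>
        if PySem.Int.band (PySem.List.pyGetD h256 b 0) ((1 : Int) <<< k.toNat) ≠ 0 then '1' else '0'))
  String.ofList (PySem.List.slice (PySem.Chars.join [] chunks) none (some length))

-- ===== PRECONDITION & SPEC =====
-- Pre_ excludes exactly the inputs where Python A raises IndexError (length > 8*len(h256)).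
def Pre_wibu_get_bits (h256 : List Int) (length : Int) : Prop :=
  length ≤ 8 * (h256.length : Int)
instance (h256 : List Int) (length : Int) : Decidable (Pre_wibu_get_bits h256 length) := by
  unfold Pre_wibu_get_bits; infer_instance

def pvWitness_wibu_get_bits : List Int × Int := ([5], 3)

def Spec_wibu_get_bits (h256 : List Int) (length : Int) (out : String) : Prop := out = wibu_get_bits_alt h256 length
instance (h256 : List Int) (length : Int) (out : String) : Decidable (Spec_wibu_get_bits h256 length out) := by unfold Spec_wibu_get_bits; infer_instance

-- ===== CLAIM (what is proved, stated in full; the proofs are below) =====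
def Claim_equal_wibu_get_bits : Prop := ∀ (h256 : List Int) (length : Int), Dom_wibu_get_bits h256 length → Pre_wibu_get_bits h256 length → Spec_wibu_get_bits h256 length (wibu_get_bits h256 length)

-- ===== LEMMAS AND PROOFS =====

-- the i-th output character: bit i%8 of byte i//8, shared characterisation of both ports
def bitChar (h256 : List Int) (i : Nat) : Char :=
  if PySem.Int.band (h256.getD (i / 8) 0) (2 ^ (i % 8)) ≠ 0 then '1' else '0'

-- A's mask update ('mask *= 2; if mask == 0x100: mask = 1') keeps mask = 2^(i % 8)
lemma maskStep (n : Nat) :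
    (if (2 : Int) ^ (n % 8) * 2 = 256 then (1 : Int) else 2 ^ (n % 8) * 2) = 2 ^ ((n + 1) % 8) := by
  have key : ∀ r : Nat, r < 8 →
      (if (2 : Int) ^ r * 2 = 256 then (1 : Int) else 2 ^ r * 2) = 2 ^ ((r + 1) % 8) := by decide
  have h : (n + 1) % 8 = (n % 8 + 1) % 8 := by omega
  rw [h]; exact key _ (Nat.mod_lt _ (by norm_num))

-- invariant of A's loop: state after i = 0..n-1 is (2^(n % 8), the first n bit-chars)
lemma loopA (h256 : List Int) (n : Nat) :
    (((List.range n).map (fun k : Nat => (k : Int))).foldl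
      (fun (st : Int × List Char) i =>
        ((if st.1 * 2 = 256 then 1 else st.1 * 2),
         if PySem.Int.band (PySem.List.pyGetD h256 (PySem.Int.floordiv i 8) 0) st.1 ≠ 0
         then st.2 ++ ['1'] else st.2 ++ ['0']))
      (1, ([] : List Char)))
    = (2 ^ (n % 8), (List.range n).map (bitChar h256)) := by
  induction n with
  | zero => simp
  | succ n ih =>
    rw [show List.range (n + 1) = List.range n ++ [n] from List.range_succ,
        List.map_append, List.foldl_append, ih, List.map_append]
    simp only [List.map_cons, List.map_nil, List.foldl_cons, List.foldl_nil]
    have hdiv : PySem.Int.floordiv (n : Int) 8 = ((n / 8 : Nat) : Int) := by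
      exact_mod_cast PySem.Int.floordiv_natCast n 8
    refine Prod.ext (maskStep n) ?_
    simp only [hdiv, PySem.List.pyGetD_natCast, bitChar]
    split_ifs <;> rfl

lemma bitChar_split (h256 : List Int) (m k : Nat) (hk : k < 8) :
    bitChar h256 (8 * m + k) = if PySem.Int.band (h256.getD m 0) (2 ^ k) ≠ 0 then '1' else '0' := by
  have h1 : (8 * m + k) / 8 = m := by omega
  have h2 : (8 * m + k) % 8 = k := by omega
  rw [bitChar, h1, h2]

-- B's chunk for byte m is exactly bit-chars 8m..8m+7
lemma inner_chunk (h256 : List Int) (m : Nat) :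
    (PySem.List.pyRange 0 8 1).map (fun k =>
        if PySem.Int.band (PySem.List.pyGetD h256 ((m : Nat) : Int) 0) ((1 : Int) <<< k.toNat) ≠ 0
        then '1' else '0')
      = (List.range 8).map (fun k => bitChar h256 (8 * m + k)) := by
  have h8 : (8 : Int) = ((8 : Nat) : Int) := by norm_num
  rw [h8, PySem.List.pyRange_zero_natCast, List.map_map]
  refine List.map_congr_left (fun k hk => ?_)
  have hk8 : k < 8 := List.mem_range.mp hk
  rw [bitChar_split h256 m k hk8]
  simp only [Function.comp_apply, PySem.List.pyGetD_natCast, Int.toNat_natCast,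
    Int.one_shiftLeft]
  push_cast
  rfl

-- ''.join of List Char chunks is flatten
lemma join_nil_flatten (l : List (List Char)) : PySem.Chars.join [] l = l.flatten := by
  induction l with
  | nil => rfl
  | cons x xs ih =>
    cases xs with
    | nil => simp [PySem.Chars.join, List.intercalate]
    | cons y ys =>
      simp only [PySem.Chars.join, List.intercalate] at ih ⊢
      simp only [List.intersperse, List.flatten_cons, List.nil_append] at ih ⊢
      rw [ih]

lemma flatten_chunks (h256 : List Int) (M : Nat) :
    ((List.range M).map (fun m => (List.range 8).map (fun k => bitChar h256 (8 * m + k)))).flatten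
      = (List.range (8 * M)).map (bitChar h256) := by
  induction M with
  | zero => simp
  | succ M ih =>
    rw [show List.range (M + 1) = List.range M ++ [M] from List.range_succ,
        List.map_append, List.flatten_append, ih,
        show 8 * (M + 1) = 8 * M + 8 from by ring, List.range_add, List.map_append]
    simp [List.map_map, Function.comp]

-- ===== VERDICT (by name: the statement is the Claim_ definition above) =====
theorem wibu_get_bits_spec : Claim_equal_wibu_get_bits := by
  intro h256 length _hdom hpre
  unfold Spec_wibu_get_bits
  dsimp only [wibu_get_bits, wibu_get_bits_alt]
  by_cases hl : 0 < length
  · -- positive length: both sides are the first `length` bit-chars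
    have hn : length = ((length.toNat : Nat) : Int) := (Int.toNat_of_nonneg (le_of_lt hl)).symm
    set n := length.toNat with hndef
    have hM : PySem.Int.floordiv (((n : Nat) : Int) + 7) 8 = (((n + 7) / 8 : Nat) : Int) := by
      exact_mod_cast PySem.Int.floordiv_natCast (n + 7) 8
    set M := (n + 7) / 8 with hMdef
    have hnM : n ≤ 8 * M := by omega
    rw [hn, if_pos (show (0 : Int) < ((n : Nat) : Int) by exact_mod_cast hn ▸ hl), hM]
    rw [PySem.List.pyRange_zero_natCast, PySem.List.pyRange_zero_natCast, loopA, List.map_map]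
    rw [show ((fun b => (PySem.List.pyRange 0 8 1).map (fun k =>
          if PySem.Int.band (PySem.List.pyGetD h256 b 0) ((1 : Int) <<< k.toNat) ≠ 0
          then '1' else '0')) ∘ (fun k : Nat => (k : Int)))
        = (fun m : Nat => (List.range 8).map (fun k => bitChar h256 (8 * m + k)))
      from funext fun m => inner_chunk h256 m]
    rw [join_nil_flatten, flatten_chunks, PySem.List.slice_to_natCast, ← List.map_take,
        List.take_range, show min n (8 * M) = n from by omega]
  · -- length ≤ 0: both sides are the empty string
    have hle : length ≤ 0 := le_of_not_gt hl
    rw [PySem.List.pyRange_one_eq_nil hle, if_neg hl,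
        PySem.List.pyRange_one_eq_nil (le_refl 0)]
    simp [PySem.Chars.join, List.intercalate, PySem.List.slice]
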